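-- pv_equiv track=rewrite | github.com/jacobr4d/reebo | py/spelling.py | split_punct
-- ===== SOURCE A (Python) =====
-- punct = {',', '.', ':', ';', '?', '!', '(', ')'}
--
-- def split_punct(word):
--     i = 0
--     while i < len(word) and word[i] in punct:
--         i += 1
--     j = len(word)
--     while j > 0 and word[j-1] in punct:
--         j -= 1
--     return (word[:i], word[i:j], word[j:]) if word[i:j] else (word[:i], '', '')
-- ===== SOURCE B (Python) =====
-- PUNCT = ',.:;?!()'
--
-- def split_punct(word):
--     # single left-to-right pass: a two-state machine (still in the leading
--     # punctuation run, or past it) with a pending buffer of punctuation that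
--     # becomes the trailing part only if no letter follows it
--     lead, mid, pending = [], [], []
--     in_lead = True
--     for c in word:
--         if c in PUNCT:
--             (lead if in_lead else pending).append(c)
--         else:
--             in_lead = False
--             mid += pending
--             pending = []
--             mid.append(c)
--     return (''.join(lead), ''.join(mid), ''.join(pending))
-- ===== Notes on version B (the rewrite author's own statement) =====
-- stated objective: alternative
-- what changed: A makes two boundary scans with index while-loops plus slicing; B is a single left-to-right pass: a two-state machine with a pending punctuation buffer that is flushed into the middle whenever a non-punctuation character follows, so the word is traversed once and never sliced.
import Mathlib
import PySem

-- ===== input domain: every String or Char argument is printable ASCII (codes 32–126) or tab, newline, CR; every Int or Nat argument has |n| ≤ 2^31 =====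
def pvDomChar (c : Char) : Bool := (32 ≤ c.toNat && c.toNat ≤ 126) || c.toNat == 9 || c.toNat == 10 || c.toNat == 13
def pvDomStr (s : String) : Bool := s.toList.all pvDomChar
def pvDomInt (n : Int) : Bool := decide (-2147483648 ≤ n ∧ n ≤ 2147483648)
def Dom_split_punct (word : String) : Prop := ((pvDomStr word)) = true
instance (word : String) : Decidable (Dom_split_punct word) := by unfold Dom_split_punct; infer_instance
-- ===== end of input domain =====

-- B replaces A's two boundary index loops with a single forward pass (a two-state
-- machine with a pending-punctuation buffer); alternative decomposition, no speed claim.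

-- ===== PORT A =====
def pvPunct : List Char := [',', '.', ':', ';', '?', '!', '(', ')']

-- while i < len(word) and word[i] in punct: i += 1   (nested if = Python's short-circuit 'and')
def pvLoopI (cs : List Char) (i : Nat) : Nat :=
  if h : i < cs.length then
    if cs[i] ∈ pvPunct then pvLoopI cs (i + 1) else i
  else i
termination_by cs.length - i

-- while j > 0 and word[j-1] in punct: j -= 1   (getD is exact here: the loop starts at j = len and only decrements, so j-1 is in range whenever it is read)
def pvLoopJ (cs : List Char) (j : Nat) : Nat :=
  if 0 < j then
    if cs.getD (j - 1) ' ' ∈ pvPunct then pvLoopJ cs (j - 1) else j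
  else j
termination_by j

def split_punct (word : String) : String × String × String :=
  let cs := word.toList
  let i := pvLoopI cs 0
  let j := pvLoopJ cs cs.length
  let mid := PySem.List.slice cs (some (i : Int)) (some (j : Int))
  if mid ≠ [] then
    (String.ofList (PySem.List.slice cs none (some (i : Int))), String.ofList mid,
     String.ofList (PySem.List.slice cs (some (j : Int)) none))
  else
    (String.ofList (PySem.List.slice cs none (some (i : Int))), "", "")

-- ===== PORT B =====
-- one step of Source B's for-loop body: state = (lead, mid, pending, in_lead)
def pvStepB (P : List Char) (st : List Char × List Char × List Char × Bool) (c : Char) :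
    List Char × List Char × List Char × Bool :=
  match st with
  | (lead, mid, pending, inLead) =>
    if c ∈ P then
      if inLead then (lead ++ [c], mid, pending, inLead)
      else (lead, mid, pending ++ [c], inLead)
    else (lead, mid ++ pending ++ [c], [], false)

def split_punct_alt (word : String) : String × String × String :=
  let P := (",.:;?!()" : String).toList
  let r := word.toList.foldl (pvStepB P) ([], [], [], true)
  (String.ofList r.1, String.ofList r.2.1, String.ofList r.2.2.1)

-- ===== PRECONDITION & SPEC =====
def Spec_split_punct (word : String) (out : String × String × String) : Prop := out = split_punct_alt word
instance (word : String) (out : String × String × String) : Decidable (Spec_split_punct word out) := by unfold Spec_split_punct; infer_instance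

-- ===== CLAIM (what is proved, stated in full; the proofs are below) =====
def Claim_equal_split_punct : Prop := ∀ (word : String), Dom_split_punct word → Spec_split_punct word (split_punct word)

-- ===== LEMMAS AND PROOFS =====

-- common target: (leading punct run, middle, trailing punct run) as lists
def pvStrip (cs : List Char) : List Char × List Char × List Char :=
  let rest := cs.dropWhile (· ∈ pvPunct)
  let mid := (rest.reverse.dropWhile (· ∈ pvPunct)).reverse
  (cs.take (cs.length - rest.length), mid, rest.drop mid.length)

lemma pv_punct_toList : (",.:;?!()" : String).toList = pvPunct := by decide

lemma pv_loopI_eq (cs : List Char) (i : Nat) :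
    pvLoopI cs i = i + ((cs.drop i).takeWhile (fun c => decide (c ∈ pvPunct))).length := by
  fun_induction pvLoopI cs i with
  | case1 i hlt hmem ih =>
      rw [ih, List.drop_eq_getElem_cons hlt, List.takeWhile_cons]
      simp [hmem]
      omega
  | case2 i hlt hmem =>
      rw [List.drop_eq_getElem_cons hlt, List.takeWhile_cons]
      simp [hmem]
  | case3 i h =>
      have : cs.drop i = [] := List.drop_eq_nil_of_le (by omega)
      simp [this]

lemma pv_loopJ_eq (cs : List Char) (j : Nat) :
    j ≤ cs.length → pvLoopJ cs j = j - (((cs.take j).reverse.takeWhile (fun c => decide (c ∈ pvPunct))).length) := by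
  fun_induction pvLoopJ cs j with
  | case1 j hpos hmem ih =>
      intro hle
      have hlt : j - 1 < cs.length := by omega
      have hget : cs.getD (j - 1) ' ' = cs[j - 1] := by
        simp [List.getD_eq_getElem?_getD, hlt]
      rw [hget] at hmem
      have hrev : (cs.take j).reverse = cs[j - 1] :: (cs.take (j - 1)).reverse := by
        conv_lhs => rw [show j = (j - 1) + 1 by omega, List.take_add_one,
          List.getElem?_eq_getElem hlt]
        simp
      have hlen : ((cs.take (j-1)).reverse.takeWhile (fun c => decide (c ∈ pvPunct))).length ≤ j - 1 := by
        have h1 := (List.takeWhile_sublist (l := (cs.take (j-1)).reverse) (fun c => decide (c ∈ pvPunct))).length_le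
        simp only [List.length_reverse, List.length_take] at h1
        omega
      rw [ih (by omega), hrev, List.takeWhile_cons]
      simp only [hmem, decide_true, if_true, List.length_cons]
      omega
  | case2 j hpos hmem =>
      intro hle
      have hlt : j - 1 < cs.length := by omega
      have hget : cs.getD (j - 1) ' ' = cs[j - 1] := by
        simp [List.getD_eq_getElem?_getD, hlt]
      rw [hget] at hmem
      have hrev : (cs.take j).reverse = cs[j - 1] :: (cs.take (j - 1)).reverse := by
        conv_lhs => rw [show j = (j - 1) + 1 by omega, List.take_add_one,
          List.getElem?_eq_getElem hlt]
        simp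
      rw [hrev, List.takeWhile_cons]
      simp [hmem]
  | case3 j h =>
      intro _
      have : j = 0 := by omega
      simp [this]

-- A equals the stripped form
lemma pv_A_strip (word : String) :
    split_punct word =
      (String.ofList (pvStrip word.toList).1, String.ofList (pvStrip word.toList).2.1,
       String.ofList (pvStrip word.toList).2.2) := by
  simp only [split_punct, pvStrip]
  generalize word.toList = cs
  obtain ⟨t, d, htw, hdw⟩ : ∃ t d, cs.takeWhile (fun c => decide (c ∈ pvPunct)) = t ∧
      cs.dropWhile (fun c => decide (c ∈ pvPunct)) = d := ⟨_, _, rfl, rfl⟩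
  have ht : cs = t ++ d := by rw [← htw, ← hdw, List.takeWhile_append_dropWhile]
  subst ht
  rcases eq_or_ne d [] with hd | hd
  · subst hd
    simp only [List.append_nil] at *
    have hi : pvLoopI t 0 = t.length := by
      rw [pv_loopI_eq]; simp [htw]
    rw [hi, hdw]
    have hmid : PySem.List.slice t (some (t.length : Int)) (some ((pvLoopJ t t.length : Nat) : Int)) = [] := by
      rw [PySem.List.slice_natCast]; simp
    rw [hmid]
    simp [PySem.List.slice_to_natCast]
  · obtain ⟨c0, d', rfl⟩ := List.exists_cons_of_ne_nil hd
    have hw : (t ++ c0 :: d').dropWhile (fun c => decide (c ∈ pvPunct)) ≠ [] := by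
      rw [hdw]; simp
    have hc0 : decide (c0 ∈ pvPunct) = false := by
      have h1 := List.head_dropWhile_not (fun c => decide (c ∈ pvPunct)) hw
      have h2 : ((t ++ c0 :: d').dropWhile (fun c => decide (c ∈ pvPunct))).head hw = c0 := by
        simp [hdw]
      rwa [h2] at h1
    obtain ⟨r, e, hrw, hew⟩ : ∃ r e, ((c0 :: d').reverse.takeWhile (fun c => decide (c ∈ pvPunct)) = r ∧
        (c0 :: d').reverse.dropWhile (fun c => decide (c ∈ pvPunct)) = e) := ⟨_, _, rfl, rfl⟩
    have hsplit : (c0 :: d').reverse = r ++ e := by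
      rw [← hrw, ← hew, List.takeWhile_append_dropWhile]
    have hrall : ∀ x ∈ r, decide (x ∈ pvPunct) = true := by
      intro x hx; rw [← hrw] at hx; exact List.mem_takeWhile_imp (p := fun c => decide (c ∈ pvPunct)) hx
    have hene : e ≠ [] := by
      intro h0
      rw [h0, List.append_nil] at hsplit
      have : decide (c0 ∈ pvPunct) = true := hrall c0 (by rw [← hsplit]; simp)
      simp [hc0] at this
    obtain ⟨m0, e', rfl⟩ := List.exists_cons_of_ne_nil hene
    have hD : c0 :: d' = (m0 :: e').reverse ++ r.reverse := by
      have := congrArg List.reverse hsplit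
      simpa using this
    have htkr : List.takeWhile (fun c => decide (c ∈ pvPunct)) r = r := by
      rw [List.takeWhile_eq_self_iff]
      exact hrall
    have hi : pvLoopI (t ++ c0 :: d') 0 = t.length := by
      rw [pv_loopI_eq]; simp [htw]
    have hm0 : decide (m0 ∈ pvPunct) = false := by
      have hw2 : (c0 :: d').reverse.dropWhile (fun c => decide (c ∈ pvPunct)) ≠ [] := by
        rw [hew]; simp
      have h1 := List.head_dropWhile_not (fun c => decide (c ∈ pvPunct)) hw2
      have h2 : ((c0 :: d').reverse.dropWhile (fun c => decide (c ∈ pvPunct))).head hw2 = m0 := by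
        simp only [hew, List.head_cons]
      rwa [h2] at h1
    have hj : pvLoopJ (t ++ c0 :: d') (t ++ c0 :: d').length = t.length + (e'.length + 1) := by
      rw [pv_loopJ_eq _ _ le_rfl, List.take_length]
      have hrev : (t ++ c0 :: d').reverse = (r ++ m0 :: e') ++ t.reverse := by
        rw [List.reverse_append, hsplit]
      have h3 : List.takeWhile (fun c => decide (c ∈ pvPunct)) (r ++ m0 :: e') = r := by
        rw [List.takeWhile_append, if_pos (by rw [htkr]), List.takeWhile_cons,
          if_neg (by rw [hm0]; exact Bool.false_ne_true), List.append_nil]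
      have h4 : List.takeWhile (fun c => decide (c ∈ pvPunct)) ((r ++ m0 :: e') ++ t.reverse) = r := by
        rw [List.takeWhile_append, h3, if_neg (by simp)]
      rw [hrev, h4]
      have := congrArg List.length hsplit
      simp at this ⊢
      omega
    rw [hi, hj, hdw, hew]
    have hmid : PySem.List.slice (t ++ c0 :: d') (some (t.length : Int))
        (some ((t.length + (e'.length + 1) : Nat) : Int)) = (m0 :: e').reverse := by
      rw [PySem.List.slice_natCast, List.drop_left]
      rw [show t.length + (e'.length + 1) - t.length = e'.length + 1 by omega]
      rw [hD, List.take_left' (by simp)]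
    have hlead : PySem.List.slice (t ++ c0 :: d') none (some (t.length : Int)) = t := by
      rw [PySem.List.slice_to_natCast, List.take_left]
    have htrail : PySem.List.slice (t ++ c0 :: d') (some ((t.length + (e'.length + 1) : Nat) : Int)) none
        = r.reverse := by
      rw [PySem.List.slice_from_natCast, hD, ← List.append_assoc]
      exact List.drop_left' (by simp)
    rw [hmid, hlead, htrail]
    simp only [ne_eq, List.reverse_eq_nil_iff, reduceCtorEq, not_false_iff, if_true]
    rw [show (t ++ c0 :: d').length - (c0 :: d').length = t.length by simp, List.take_left]
    rw [show List.drop (m0 :: e').reverse.length (c0 :: d') = r.reverse by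
      simp only [List.length_reverse, List.length_cons]
      rw [hD]
      exact List.drop_left' (by simp)]

-- appending past a list whose dropWhile is nonempty does not change its takeWhile/dropWhile prefix behaviour
lemma pv_dropWhile_ext (p : Char → Bool) (X Y : List Char) (h : X.dropWhile p ≠ []) :
    (X ++ Y).dropWhile p = X.dropWhile p ++ Y := by
  induction X with
  | nil => simp at h
  | cons x X' ih =>
      by_cases hx : p x = true
      · simp only [List.cons_append, List.dropWhile_cons, hx, if_true]
        exact ih (by simpa [hx] using h)
      · simp [hx]

lemma pv_takeWhile_ext (p : Char → Bool) (X Y : List Char) (h : X.dropWhile p ≠ []) :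
    (X ++ Y).takeWhile p = X.takeWhile p := by
  induction X with
  | nil => simp at h
  | cons x X' ih =>
      by_cases hx : p x = true
      · simp only [List.cons_append, List.takeWhile_cons, hx, if_true]
        rw [ih (by simpa [hx] using h)]
      · simp [hx]

lemma pv_dropWhile_all (p : Char → Bool) (X Y : List Char) (h : X.dropWhile p = []) :
    (X ++ Y).dropWhile p = Y.dropWhile p := by
  induction X with
  | nil => simp
  | cons x X' ih =>
      by_cases hx : p x = true
      · simp only [List.cons_append, List.dropWhile_cons, hx, if_true]
        exact ih (by simpa [hx] using h)
      · simp [hx] at h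

lemma pv_takeWhile_all (p : Char → Bool) (X Y : List Char) (h : X.dropWhile p = []) :
    (X ++ Y).takeWhile p = X ++ Y.takeWhile p := by
  induction X with
  | nil => simp
  | cons x X' ih =>
      by_cases hx : p x = true
      · simp only [List.cons_append, List.takeWhile_cons, hx, if_true]
        rw [ih (by simpa [hx] using h)]
      · simp [hx] at h

-- B's fold while still in the leading-punctuation state
lemma pv_foldB_lead (l lead : List Char) (h : ∀ x ∈ l, x ∈ pvPunct) :
    List.foldl (pvStepB pvPunct) (lead, [], [], true) l = (lead ++ l, [], [], true) := by
  induction l generalizing lead with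
  | nil => simp
  | cons c l' ih =>
      have hc : c ∈ pvPunct := h c (by simp)
      simp only [List.foldl_cons, pvStepB, if_pos hc, if_true]
      rw [ih (lead ++ [c]) (fun x hx => h x (by simp [hx]))]
      simp

-- B's fold after the state machine has left the leading state
lemma pv_foldB_false (l mid pending lead : List Char) :
    List.foldl (pvStepB pvPunct) (lead, mid, pending, false) l =
      if l.reverse.dropWhile (fun c => decide (c ∈ pvPunct)) = [] then (lead, mid, pending ++ l, false)
      else (lead, mid ++ pending ++ (l.reverse.dropWhile (fun c => decide (c ∈ pvPunct))).reverse,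
            (l.reverse.takeWhile (fun c => decide (c ∈ pvPunct))).reverse, false) := by
  induction l generalizing mid pending with
  | nil => simp
  | cons c l' ih =>
      by_cases hc : c ∈ pvPunct
      · simp only [List.foldl_cons, pvStepB, if_pos hc]
        rw [if_neg Bool.false_ne_true]
        rw [ih mid (pending ++ [c])]
        rcases eq_or_ne (l'.reverse.dropWhile (fun c => decide (c ∈ pvPunct))) [] with he | he
        · have hD : ((c :: l').reverse).dropWhile (fun c => decide (c ∈ pvPunct)) = [] := by
            rw [List.reverse_cons, pv_dropWhile_all _ _ _ he]
            simp [hc]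
          rw [if_pos he, if_pos hD]
          simp
        · have hD : ((c :: l').reverse).dropWhile (fun c => decide (c ∈ pvPunct)) =
              l'.reverse.dropWhile (fun c => decide (c ∈ pvPunct)) ++ [c] := by
            rw [List.reverse_cons, pv_dropWhile_ext _ _ _ he]
          have hT : ((c :: l').reverse).takeWhile (fun c => decide (c ∈ pvPunct)) =
              l'.reverse.takeWhile (fun c => decide (c ∈ pvPunct)) := by
            rw [List.reverse_cons, pv_takeWhile_ext _ _ _ he]
          rw [if_neg he, hD, hT, if_neg (by simp)]
          simp
      · simp only [List.foldl_cons, pvStepB, if_neg hc]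
        rw [ih (mid ++ pending ++ [c]) []]
        rcases eq_or_ne (l'.reverse.dropWhile (fun c => decide (c ∈ pvPunct))) [] with he | he
        · have hD : ((c :: l').reverse).dropWhile (fun c => decide (c ∈ pvPunct)) = [c] := by
            rw [List.reverse_cons, pv_dropWhile_all _ _ _ he]
            simp [hc]
          have hT : ((c :: l').reverse).takeWhile (fun c => decide (c ∈ pvPunct)) = l'.reverse := by
            rw [List.reverse_cons, pv_takeWhile_all _ _ _ he]
            simp [hc]
          rw [if_pos he, if_neg (by rw [hD]; simp), hD, hT]
          simp
        · have hD : ((c :: l').reverse).dropWhile (fun c => decide (c ∈ pvPunct)) =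
              l'.reverse.dropWhile (fun c => decide (c ∈ pvPunct)) ++ [c] := by
            rw [List.reverse_cons, pv_dropWhile_ext _ _ _ he]
          have hT : ((c :: l').reverse).takeWhile (fun c => decide (c ∈ pvPunct)) =
              l'.reverse.takeWhile (fun c => decide (c ∈ pvPunct)) := by
            rw [List.reverse_cons, pv_takeWhile_ext _ _ _ he]
          rw [if_neg he, if_neg (by rw [hD]; simp), hD, hT]
          simp

-- B equals the stripped form
lemma pv_B_strip (word : String) :
    split_punct_alt word =
      (String.ofList (pvStrip word.toList).1, String.ofList (pvStrip word.toList).2.1,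
       String.ofList (pvStrip word.toList).2.2) := by
  simp only [split_punct_alt, pvStrip, pv_punct_toList]
  generalize word.toList = cs
  obtain ⟨t, d, htw, hdw⟩ : ∃ t d, cs.takeWhile (fun c => decide (c ∈ pvPunct)) = t ∧
      cs.dropWhile (fun c => decide (c ∈ pvPunct)) = d := ⟨_, _, rfl, rfl⟩
  have ht : cs = t ++ d := by rw [← htw, ← hdw, List.takeWhile_append_dropWhile]
  subst ht
  have htall : ∀ x ∈ t, x ∈ pvPunct := by
    intro x hx
    rw [← htw] at hx
    have := List.mem_takeWhile_imp (p := fun c => decide (c ∈ pvPunct)) hx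
    simpa using this
  have hfold0 : List.foldl (pvStepB pvPunct) ([], [], [], true) (t ++ d)
      = List.foldl (pvStepB pvPunct) (t, [], [], true) d := by
    rw [List.foldl_append, pv_foldB_lead t [] htall]
    simp
  rcases eq_or_ne d [] with hd | hd
  · subst hd
    simp only [List.append_nil] at *
    rw [hfold0, hdw]
    simp
  · obtain ⟨c0, d', rfl⟩ := List.exists_cons_of_ne_nil hd
    have hc0 : decide (c0 ∈ pvPunct) = false := by
      have hw : (t ++ c0 :: d').dropWhile (fun c => decide (c ∈ pvPunct)) ≠ [] := by
        rw [hdw]; simp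
      have h1 := List.head_dropWhile_not (fun c => decide (c ∈ pvPunct)) hw
      have h2 : ((t ++ c0 :: d').dropWhile (fun c => decide (c ∈ pvPunct))).head hw = c0 := by
        simp [hdw]
      rwa [h2] at h1
    have hc0' : ¬ c0 ∈ pvPunct := by simpa using hc0
    have hrest : (t ++ c0 :: d').length - (c0 :: d').length = t.length := by simp
    rw [hfold0, hdw, hrest, List.take_left]
    simp only [List.foldl_cons, pvStepB, if_neg hc0', List.nil_append]
    rw [pv_foldB_false d' [c0] [] t]
    rcases eq_or_ne (d'.reverse.dropWhile (fun c => decide (c ∈ pvPunct))) [] with he | he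
    · have hD : ((c0 :: d').reverse).dropWhile (fun c => decide (c ∈ pvPunct)) = [c0] := by
        rw [List.reverse_cons, pv_dropWhile_all _ _ _ he]
        simp [hc0']
      rw [if_pos he, hD]
      simp
    · have hD : ((c0 :: d').reverse).dropWhile (fun c => decide (c ∈ pvPunct)) =
          d'.reverse.dropWhile (fun c => decide (c ∈ pvPunct)) ++ [c0] := by
        rw [List.reverse_cons, pv_dropWhile_ext _ _ _ he]
      rw [if_neg he, hD]
      obtain ⟨rr, ee, hrr, hee⟩ : ∃ rr ee, d'.reverse.takeWhile (fun c => decide (c ∈ pvPunct)) = rr ∧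
          d'.reverse.dropWhile (fun c => decide (c ∈ pvPunct)) = ee := ⟨_, _, rfl, rfl⟩
      have hsplit : d'.reverse = rr ++ ee := by
        rw [← hrr, ← hee, List.takeWhile_append_dropWhile]
      have hd' : d' = ee.reverse ++ rr.reverse := by
        have := congrArg List.reverse hsplit
        simpa using this
      rw [hrr, hee]
      have hdrop : List.drop (ee ++ [c0]).reverse.length (c0 :: d') = rr.reverse := by
        have : (c0 :: d') = (c0 :: ee.reverse) ++ rr.reverse := by rw [hd']; simp
        rw [this]
        have hlen : (ee ++ [c0]).reverse.length = (c0 :: ee.reverse).length := by simp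
        rw [hlen]
        exact List.drop_left
      rw [hdrop]
      simp

lemma pv_main (word : String) : split_punct word = split_punct_alt word :=
  (pv_A_strip word).trans (pv_B_strip word).symm

-- ===== VERDICT (by name: the statement is the Claim_ definition above) =====
theorem split_punct_spec : Claim_equal_split_punct := by
  intro word _
  exact pv_main word
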